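-- pv_equiv track=rewrite | github.com/thpatch/thpatch-scripts | th105/cv1_to_wiki.py | read_field
-- ===== SOURCE A (Python) =====
-- def read_field(text, separator):
-- 	is_in_quote = False
-- 	field_start = 0
-- 	for i in range(0, len(text)):
-- 		if is_in_quote:
-- 			if text[i] == '"':
-- 				is_in_quote = False
-- 			continue
-- 		if text[i] == '"':
-- 			is_in_quote = True
-- 			continue
-- 		if text[i] == separator:
-- 			yield text[field_start:i]
-- 			field_start = i + 1
-- 	if field_start != len(text):
-- 		yield text[field_start:len(text)]
-- ===== SOURCE B (Python) =====
-- def read_field(text, separator):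
--     # Phase 1: one scan collecting positions of separators outside quotes.
--     positions = []
--     in_quote = False
--     for i, c in enumerate(text):
--         if c == '"':
--             in_quote = not in_quote
--         elif not in_quote and c == separator:
--             positions.append(i)
--     # Phase 2: turn the position list into field slices.
--     start = 0
--     for p in positions:
--         yield text[start:p]
--         start = p + 1
--     if start != len(text):
--         yield text[start:]
-- ===== Notes on version B (the rewrite author's own statement) =====
-- stated objective: alternative
-- what changed: B splits A's single interleaved scan-and-yield loop into two phases: one scan that only records the indices of separators outside quotes, then a separate pass that turns that position list into field slices.
import Mathlib
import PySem

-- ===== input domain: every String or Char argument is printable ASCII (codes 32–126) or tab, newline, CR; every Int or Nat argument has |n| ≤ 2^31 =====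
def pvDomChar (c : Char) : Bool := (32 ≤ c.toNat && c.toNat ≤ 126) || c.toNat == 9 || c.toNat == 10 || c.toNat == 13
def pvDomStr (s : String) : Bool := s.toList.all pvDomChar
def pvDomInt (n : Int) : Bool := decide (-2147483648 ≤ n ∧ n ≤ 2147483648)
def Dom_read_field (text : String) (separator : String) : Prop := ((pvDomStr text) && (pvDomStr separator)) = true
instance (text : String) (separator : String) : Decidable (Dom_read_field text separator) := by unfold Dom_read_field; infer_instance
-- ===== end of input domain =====

-- B replaces A's interleaved scan-and-yield loop by two phases (collect out-of-quote
-- separator positions, then slice); alternative decomposition, same cost; equivalence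
-- is about the yielded sequence (neither mutates its arguments).

-- ===== PORT A =====
-- A's loop over i in range(len(text)) with state (is_in_quote, field_start); slices
-- text[field_start:i] (0 ≤ field_start ≤ i ≤ len) are exactly (drop ∘ take) here.
def rfLoopA (full : List Char) (sep : String) : List Char → Nat → Bool → Nat → List String
  | [], _, _, start =>
      if start ≠ full.length then [String.mk (full.drop start)] else []
  | c :: rest, i, inq, start =>
      if inq then
        rfLoopA full sep rest (i + 1) (if c = '"' then false else true) start
      else if c = '"' then
        rfLoopA full sep rest (i + 1) true start
      else if String.mk [c] = sep then
        String.mk ((full.drop start).take (i - start)) :: rfLoopA full sep rest (i + 1) inq (i + 1)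
      else
        rfLoopA full sep rest (i + 1) inq start

def read_field (text : String) (separator : String) : List String :=
  rfLoopA text.toList separator text.toList 0 false 0

-- ===== PORT B =====
-- phase 1: positions of separators outside quotes
def rfPositions (sep : String) : List Char → Nat → Bool → List Nat
  | [], _, _ => []
  | c :: rest, i, inq =>
      if c = '"' then rfPositions sep rest (i + 1) (!inq)
      else if !inq && String.mk [c] = sep then i :: rfPositions sep rest (i + 1) inq
      else rfPositions sep rest (i + 1) inq

-- phase 2: position list → field slices
def rfFields (full : List Char) : List Nat → Nat → List String
  | [], start => if start ≠ full.length then [String.mk (full.drop start)] else []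
  | p :: ps, start => String.mk ((full.drop start).take (p - start)) :: rfFields full ps (p + 1)

def read_field_alt (text : String) (separator : String) : List String :=
  rfFields text.toList (rfPositions separator text.toList 0 false) 0

-- ===== PRECONDITION & SPEC =====
def Spec_read_field (text : String) (separator : String) (out : List String) : Prop := out = read_field_alt text separator
instance (text : String) (separator : String) (out : List String) : Decidable (Spec_read_field text separator out) := by unfold Spec_read_field; infer_instance

-- ===== CLAIM (what is proved, stated in full; the proofs are below) =====
def Claim_equal_read_field : Prop := ∀ (text : String) (separator : String), Dom_read_field text separator → Spec_read_field text separator (read_field text separator)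

-- ===== LEMMAS AND PROOFS =====
theorem rfLoopA_eq (full : List Char) (sep : String) :
    ∀ (cs : List Char) (i : Nat) (inq : Bool) (start : Nat),
      rfLoopA full sep cs i inq start = rfFields full (rfPositions sep cs i inq) start := by
  intro cs
  induction cs with
  | nil => intro i inq start; simp [rfLoopA, rfPositions, rfFields]
  | cons c rest ih =>
      intro i inq start
      by_cases hq : c = '"'
      · cases inq <;> simp [rfLoopA, rfPositions, hq, ih]
      · cases inq <;> by_cases hs : String.mk [c] = sep <;>
          simp [rfLoopA, rfPositions, rfFields, hq, hs, ih]

-- ===== VERDICT (by name: the statement is the Claim_ definition above) =====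
theorem read_field_spec : Claim_equal_read_field := by
  intro text separator _
  unfold Spec_read_field read_field read_field_alt
  exact rfLoopA_eq _ _ _ _ _ _
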